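-- pv_equiv track=rewrite | github.com/hectcastro/aoc | 2024/11/2.py | split_stone_in_half
-- ===== SOURCE A (Python) =====
-- def convert_digits_to_int(digits: list[int]) -> int:
--     """Converts a list of digits to an integer, returning 0 for empty lists."""
--     return int("".join([str(d) for d in digits]) or "0")
--
-- def split_stone_in_half(stone: int) -> tuple[int, int]:
--     """Splits an integer into two halves by its digits."""
--     digits = []
--
--     # Extract digits from right to left by repeatedly dividing by 10.
--     while stone:
--         digits.append(stone % 10)
--         stone //= 10
--
--     # Reverse digits to get original order.
--     digits.reverse()
--
--     mid = len(digits) // 2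
--     left = convert_digits_to_int(digits[:mid])
--     right = convert_digits_to_int(digits[mid:])
--
--     return left, right
-- ===== SOURCE B (Python) =====
-- def split_stone_in_half(stone: int) -> tuple[int, int]:
--     """Splits an integer into two halves by its digits."""
--     s = str(stone)
--     mid = len(s) // 2
--     return int(s[:mid] or "0"), int(s[mid:] or "0")
-- ===== Notes on version B (the rewrite author's own statement) =====
-- stated objective: simpler
-- what changed: B slices the decimal string representation directly (str, len//2, int on each half) instead of extracting a digit list with a %10-//10 loop, reversing it, and re-joining digit slices through a helper.
import Mathlib
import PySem

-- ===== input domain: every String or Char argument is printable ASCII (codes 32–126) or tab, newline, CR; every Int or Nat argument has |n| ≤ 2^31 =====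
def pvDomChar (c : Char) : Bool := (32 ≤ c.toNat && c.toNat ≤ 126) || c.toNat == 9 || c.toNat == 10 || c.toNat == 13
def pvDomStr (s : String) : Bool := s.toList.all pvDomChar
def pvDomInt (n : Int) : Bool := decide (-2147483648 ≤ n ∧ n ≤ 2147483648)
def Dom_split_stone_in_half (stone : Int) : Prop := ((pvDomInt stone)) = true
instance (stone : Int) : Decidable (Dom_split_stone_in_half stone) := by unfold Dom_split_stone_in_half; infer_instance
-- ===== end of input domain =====

-- B slices the decimal string representation directly instead of A's %10-//10 digit-list loop
-- with reverse and join; simpler decomposition, same O(d) cost. Pre_ restricts to stone ≥ 0: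
-- on negative stone the Python A loops forever, since floor division by 10 is stationary below zero; A never returns there.


-- ===== PORT A =====
-- the `while stone:` loop, collecting stone % 10 and flooring by 10; faithful for stone ≥ 0
-- (Pre_); digits come out least-significant first, as appended by the Python loop
def pvExtractDigits (n : Nat) : List Int :=
  if n = 0 then [] else ((n % 10 : Nat) : Int) :: pvExtractDigits (n / 10)
decreasing_by exact Nat.div_lt_self (Nat.pos_of_ne_zero (by assumption)) (by decide)

-- int("".join([str(d) for d in digits]) or "0"); "".join ported as flatten of the per-digit
-- char lists (exact: the separator is empty); int(...) = PySem.Int.ofChars?, which is some on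
-- every string this program feeds it (digit characters), so .getD 0 is never the default
def convertDigitsToInt (digits : List Int) : Int :=
  let cs := (digits.map PySem.Int.toChars).flatten
  (PySem.Int.ofChars? (if cs = [] then ['0'] else cs)).getD 0

def split_stone_in_half (stone : Int) : Int × Int :=
  let digits := (pvExtractDigits stone.toNat).reverse   -- loop, then digits.reverse()
  let mid := digits.length / 2
  -- digits[:mid] / digits[mid:] with 0 ≤ mid ≤ len: exactly take / drop
  (convertDigitsToInt (digits.take mid), convertDigitsToInt (digits.drop mid))

-- ===== PORT B =====
def split_stone_in_half_alt (stone : Int) : Int × Int :=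
  let s := PySem.Int.toChars stone                      -- str(stone)
  let mid := s.length / 2
  let l := s.take mid                                   -- s[:mid] (0 ≤ mid ≤ len)
  let r := s.drop mid                                   -- s[mid:]
  ((PySem.Int.ofChars? (if l = [] then ['0'] else l)).getD 0,   -- int(s[:mid] or "0")
   (PySem.Int.ofChars? (if r = [] then ['0'] else r)).getD 0)   -- int(s[mid:] or "0")

-- ===== PRECONDITION & SPEC =====
-- Pre_ excludes negative stone: there the Python A never returns (the while loop diverges,
-- since the floored division never drives a negative stone to zero)
def Pre_split_stone_in_half (stone : Int) : Prop := 0 ≤ stone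
instance (stone : Int) : Decidable (Pre_split_stone_in_half stone) := by unfold Pre_split_stone_in_half; infer_instance
def pvWitness_split_stone_in_half : Int := (1234)
def Spec_split_stone_in_half (stone : Int) (out : Int × Int) : Prop := out = split_stone_in_half_alt stone
instance (stone : Int) (out : Int × Int) : Decidable (Spec_split_stone_in_half stone out) := by unfold Spec_split_stone_in_half; infer_instance

-- ===== CLAIM (what is proved, stated in full; the proofs are below) =====
def Claim_equal_split_stone_in_half : Prop := ∀ (stone : Int), Dom_split_stone_in_half stone → Pre_split_stone_in_half stone → Spec_split_stone_in_half stone (split_stone_in_half stone)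

-- ===== LEMMAS AND PROOFS =====

-- every digit the loop collects lies in [0, 10)
theorem pvExtractDigits_mem (n : Nat) : ∀ d ∈ pvExtractDigits n, 0 ≤ d ∧ d < 10 := by
  induction n using pvExtractDigits.induct with
  | case1 => intro d hd; simp [pvExtractDigits] at hd
  | case2 n hn ih =>
    intro d hd
    rw [pvExtractDigits, if_neg hn] at hd
    rcases List.mem_cons.mp hd with rfl | hd
    · constructor <;> [positivity; exact_mod_cast Nat.mod_lt n (by decide)]
    · exact ih d hd

-- str(d) of a single digit is one character
theorem toChars_digit (d : Int) (h0 : 0 ≤ d) (h : d < 10) :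
    PySem.Int.toChars d = [Nat.digitChar d.toNat] := by
  rw [PySem.Int.toChars, if_neg (by omega)]
  exact Nat.toDigits_of_lt_base (by omega)

-- the loop's digits, reversed and rendered, are exactly str(n)
theorem extract_rev_map (n : Nat) :
    0 < n → (pvExtractDigits n).reverse.map (fun d => Nat.digitChar d.toNat) = Nat.toDigits 10 n := by
  induction n using pvExtractDigits.induct with
  | case1 => omega
  | case2 n hn ih =>
    intro _
    rw [pvExtractDigits, if_neg hn, List.reverse_cons, List.map_append]
    by_cases h10 : n < 10
    · have hq : n / 10 = 0 := Nat.div_eq_of_lt h10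
      rw [hq] at *
      simp [pvExtractDigits, Nat.toDigits_of_lt_base h10, Nat.mod_eq_of_lt h10]
    · rw [ih (Nat.div_pos (by omega) (by decide)),
        Nat.toDigits_of_base_le (b := 10) (n := n) (by decide) (by omega)]
      simp
      congr 1

-- rendering a list of single digits and joining = mapping each digit to its character
theorem flatten_map_toChars (l : List Int) (hl : ∀ d ∈ l, 0 ≤ d ∧ d < 10) :
    (l.map PySem.Int.toChars).flatten = l.map (fun d => Nat.digitChar d.toNat) := by
  induction l with
  | nil => rfl
  | cons a t ih =>
    have ha := hl a (List.mem_cons_self)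
    simp [toChars_digit a ha.1 ha.2, ih (fun d hd => hl d (List.mem_cons_of_mem a hd))]

theorem split_eq (stone : Int) (h : 0 ≤ stone) :
    split_stone_in_half stone = split_stone_in_half_alt stone := by
  obtain ⟨n, rfl⟩ := Int.eq_ofNat_of_zero_le h
  by_cases hn : n = 0
  · subst hn
    simp [split_stone_in_half, split_stone_in_half_alt, convertDigitsToInt,
      pvExtractDigits, PySem.Int.toChars, Nat.toDigits_zero]
  · have hpos : 0 < n := Nat.pos_of_ne_zero hn
    have hs : PySem.Int.toChars (n : Int) = Nat.toDigits 10 n := by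
      rw [PySem.Int.toChars, if_neg (by omega)]; simp
    have htn : ((n : Int)).toNat = n := Int.toNat_natCast n
    have hmem : ∀ d ∈ (pvExtractDigits n).reverse, 0 ≤ d ∧ d < 10 :=
      fun d hd => pvExtractDigits_mem n d (List.mem_reverse.mp hd)
    have hmapD : (pvExtractDigits n).reverse.map (fun d => Nat.digitChar d.toNat)
        = Nat.toDigits 10 n := extract_rev_map n hpos
    have hlen : (pvExtractDigits n).reverse.length = (Nat.toDigits 10 n).length := by
      rw [← hmapD]; simp
    have h1 : ∀ m, (((pvExtractDigits n).reverse.take m).map PySem.Int.toChars).flatten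
        = (Nat.toDigits 10 n).take m := by
      intro m
      rw [flatten_map_toChars _ (fun d hd => hmem d (List.mem_of_mem_take hd)),
        List.map_take, hmapD]
    have h2 : ∀ m, (((pvExtractDigits n).reverse.drop m).map PySem.Int.toChars).flatten
        = (Nat.toDigits 10 n).drop m := by
      intro m
      rw [flatten_map_toChars _ (fun d hd => hmem d (List.mem_of_mem_drop hd)),
        List.map_drop, hmapD]
    show (convertDigitsToInt _, convertDigitsToInt _) = _
    rw [split_stone_in_half_alt]
    simp only [convertDigitsToInt, htn, hs, hlen, h1, h2]

-- ===== VERDICT (by name: the statement is the Claim_ definition above) =====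
theorem split_stone_in_half_spec : Claim_equal_split_stone_in_half := by
  intro stone _ hpre
  exact split_eq stone hpre
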